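-- pv_equiv track=rewrite | github.com/gnya/scripts | addons/rig/props/__init__.py | _calc_depth
-- ===== SOURCE A (Python) =====
-- def _calc_depth(deps, bone_depth):
--     if len(deps) == 0:
--         return 0
--
--     max_depth = 0
--
--     for dep in deps:
--         if dep not in bone_depth:
--             return -1
--         else:
--             if max_depth < bone_depth[dep]:
--                 max_depth = bone_depth[dep]
--
--     return max_depth + 1
-- ===== SOURCE B (Python) =====
-- def _calc_depth(deps, bone_depth):
--     if len(deps) == 0:
--         return 0
--     need = set(deps)
--     found = 0
--     best = 0
--     for key, depth in bone_depth.items():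
--         if key in need:
--             found += 1
--             if depth > best:
--                 best = depth
--     return best + 1 if found == len(need) else -1
-- ===== Notes on version B (the rewrite author's own statement) =====
-- stated objective: alternative
-- what changed: Inverts the traversal: instead of scanning deps and looking each one up in the dict, B builds set(deps) once and makes a single pass over bone_depth.items(), counting how many needed keys it meets and tracking their max depth; found == len(set(deps)) replaces A's per-dep membership test with early return.
import Mathlib
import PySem

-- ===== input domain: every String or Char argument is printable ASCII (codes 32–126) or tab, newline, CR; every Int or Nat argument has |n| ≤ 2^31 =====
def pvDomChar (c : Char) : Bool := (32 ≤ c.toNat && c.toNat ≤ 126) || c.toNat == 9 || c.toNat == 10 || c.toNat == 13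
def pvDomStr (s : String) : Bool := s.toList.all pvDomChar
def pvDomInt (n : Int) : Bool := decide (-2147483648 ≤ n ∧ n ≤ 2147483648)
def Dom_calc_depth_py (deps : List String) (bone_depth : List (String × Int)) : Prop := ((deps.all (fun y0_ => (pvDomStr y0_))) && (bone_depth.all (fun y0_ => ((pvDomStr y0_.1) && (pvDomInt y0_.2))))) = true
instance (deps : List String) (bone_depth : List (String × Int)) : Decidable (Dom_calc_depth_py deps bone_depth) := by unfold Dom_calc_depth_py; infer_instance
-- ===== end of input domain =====

-- B inverts the traversal: one pass over the dict's items with set(deps), counting matched needed keys and their max, instead of A's per-dep lookup loop; same O(n) cost. Return-value equivalence proved under Pre_ (unique dict keys, automatic for a Python dict).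


-- ===== PORT A =====
-- dict lookup on the association list: first matching key (insertion order)
def pvLookup (bone_depth : List (String × Int)) (d : String) : Option Int :=
  (bone_depth.find? (fun p => p.1 == d)).map Prod.snd

-- A's for-loop: early return -1 on a missing key, otherwise track the running max
def calcA_loop (bone_depth : List (String × Int)) : List String → Int → Int
  | [], max_depth => max_depth + 1
  | d :: rest, max_depth =>
    match pvLookup bone_depth d with
    | none => -1
    | some v => calcA_loop bone_depth rest (if max_depth < v then v else max_depth)

def calc_depth_py (deps : List String) (bone_depth : List (String × Int)) : Int :=
  if deps.length = 0 then 0 else calcA_loop bone_depth deps 0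

-- ===== PORT B =====
-- B's for-loop over bone_depth.items(): state (found, best)
def calcB_loop (need : PySem.Set String) : List (String × Int) → Int × Int → Int × Int
  | [], fb => fb
  | kv :: rest, fb =>
    if PySem.Set.contains need kv.1 then
      calcB_loop need rest (fb.1 + 1, if fb.2 < kv.2 then kv.2 else fb.2)
    else
      calcB_loop need rest fb

def calc_depth_py_alt (deps : List String) (bone_depth : List (String × Int)) : Int :=
  if deps.length = 0 then 0
  else
    let need : PySem.Set String := PySem.Set.ofList deps
    let fb := calcB_loop need bone_depth (0, 0)
    if fb.1 = PySem.Set.len need then fb.2 + 1 else -1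

-- ===== PRECONDITION & SPEC =====
-- Pre_ requires the association list's keys to be pairwise distinct: a Python dict can
-- never hold duplicate keys, so this excludes no input the Python programs can receive;
-- on duplicate-key lists A's first-match lookup vs B's full scan would be an artefact.
def Pre_calc_depth_py (deps : List String) (bone_depth : List (String × Int)) : Prop :=
  (bone_depth.map Prod.fst).Nodup
instance (deps : List String) (bone_depth : List (String × Int)) : Decidable (Pre_calc_depth_py deps bone_depth) := by unfold Pre_calc_depth_py; infer_instance

def pvWitness_calc_depth_py : List String × (List (String × Int)) :=
  (["a", "b"], [("a", 2), ("b", 1), ("c", 7)])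

def Spec_calc_depth_py (deps : List String) (bone_depth : List (String × Int)) (out : Int) : Prop := out = calc_depth_py_alt deps bone_depth
instance (deps : List String) (bone_depth : List (String × Int)) (out : Int) : Decidable (Spec_calc_depth_py deps bone_depth out) := by unfold Spec_calc_depth_py; infer_instance

-- ===== CLAIM (what is proved, stated in full; the proofs are below) =====
def Claim_equal_calc_depth_py : Prop := ∀ (deps : List String) (bone_depth : List (String × Int)), Dom_calc_depth_py deps bone_depth → Pre_calc_depth_py deps bone_depth → Spec_calc_depth_py deps bone_depth (calc_depth_py deps bone_depth)

-- ===== LEMMAS AND PROOFS =====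

-- A's loop, closed forms
theorem calcA_loop_miss (bd : List (String × Int)) (deps : List String) (m : Int)
    (h : deps.any (fun d => (pvLookup bd d).isNone) = true) :
    calcA_loop bd deps m = -1 := by
  induction deps generalizing m with
  | nil => simp at h
  | cons d rest ih =>
    simp only [List.any_cons, Bool.or_eq_true] at h
    cases hv : pvLookup bd d with
    | none => simp [calcA_loop, hv]
    | some v =>
      simp [hv] at h
      have h' : (rest.any fun d => (pvLookup bd d).isNone) = true := by
        simp only [List.any_eq_true, Option.isNone_iff_eq_none]; exact h
      simp [calcA_loop, hv, ih _ h']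

theorem calcA_loop_hit (bd : List (String × Int)) (deps : List String) (m : Int)
    (h : deps.any (fun d => (pvLookup bd d).isNone) = false) :
    calcA_loop bd deps m =
      (deps.map (fun d => (pvLookup bd d).getD 0)).foldl max m + 1 := by
  induction deps generalizing m with
  | nil => simp [calcA_loop]
  | cons d rest ih =>
    simp only [List.any_cons, Bool.or_eq_false_iff] at h
    cases hv : pvLookup bd d with
    | none => simp [hv] at h
    | some v =>
      simp only [calcA_loop, hv, List.map_cons, List.foldl_cons, Option.getD_some]
      rw [ih _ h.2]
      congr 2
      omega

-- B's loop, closed form: count and max-fold over the matched entries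
theorem calcB_loop_eq (need : PySem.Set String) (bd : List (String × Int)) (f b : Int) :
    calcB_loop need bd (f, b) =
      (f + ((bd.filter (fun kv => PySem.Set.contains need kv.1)).length : Int),
       ((bd.filter (fun kv => PySem.Set.contains need kv.1)).map Prod.snd).foldl max b) := by
  induction bd generalizing f b with
  | nil => simp [calcB_loop]
  | cons kv rest ih =>
    by_cases hc : PySem.Set.contains need kv.1
    · simp only [calcB_loop, hc, if_true, List.filter_cons, List.length_cons,
        List.map_cons, List.foldl_cons, ih]
      refine Prod.ext ?_ ?_
      · push_cast; ring
      · show List.foldl max (if b < kv.2 then kv.2 else b) _ = _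
        congr 1
        omega
    · simp only [calcB_loop, hc, if_false, List.filter_cons, ih, Bool.false_eq_true]

-- max-fold facts
theorem le_foldl_max (l : List Int) (a : Int) : a ≤ l.foldl max a := by
  induction l generalizing a with
  | nil => simp
  | cons c l ih => exact le_trans (le_max_left a c) (ih _)

theorem mem_le_foldl_max {x : Int} {l : List Int} (h : x ∈ l) (a : Int) : x ≤ l.foldl max a := by
  induction l generalizing a with
  | nil => simp at h
  | cons c l ih =>
    rcases List.mem_cons.mp h with rfl | h
    · exact le_trans (le_max_right a x) (le_foldl_max _ _)
    · exact ih h _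

theorem foldl_max_cases (l : List Int) (a : Int) :
    l.foldl max a = a ∨ l.foldl max a ∈ l := by
  induction l generalizing a with
  | nil => left; rfl
  | cons c l ih =>
    rcases ih (max a c) with h | h
    · simp only [List.foldl_cons, h]
      rcases max_cases a c with ⟨h1, _⟩ | ⟨h1, _⟩
      · left; exact h1
      · right; simp [h1]
    · right; exact List.mem_cons_of_mem _ h

theorem foldl_max_congr (l1 l2 : List Int) (a : Int)
    (h1 : ∀ x ∈ l1, x ∈ l2) (h2 : ∀ x ∈ l2, x ∈ l1) :
    l1.foldl max a = l2.foldl max a := by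
  apply le_antisymm
  · rcases foldl_max_cases l1 a with h | h
    · rw [h]; exact le_foldl_max _ _
    · exact mem_le_foldl_max (h1 _ h) _
  · rcases foldl_max_cases l2 a with h | h
    · rw [h]; exact le_foldl_max _ _
    · exact mem_le_foldl_max (h2 _ h) _

-- with Nodup keys, a member entry is exactly what find? returns
theorem lookup_of_mem {bd : List (String × Int)} (hnd : (bd.map Prod.fst).Nodup)
    {k : String} {v : Int} (h : (k, v) ∈ bd) : pvLookup bd k = some v := by
  induction bd with
  | nil => simp at h
  | cons kv rest ih =>
    simp only [List.map_cons, List.nodup_cons] at hnd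
    rcases List.mem_cons.mp h with rfl | h
    · simp [pvLookup, List.find?]
    · have hne : kv.1 ≠ k := by
        intro he
        exact hnd.1 (he ▸ (List.mem_map.mpr ⟨(k, v), h, rfl⟩))
      have : pvLookup rest k = some v := ih hnd.2 h
      simp only [pvLookup, List.find?] at this ⊢
      simp [beq_eq_false_iff_ne.mpr hne, this]

-- two Nodup lists with mutual inclusion-in-one-direction and equal lengths have the same members
theorem nodup_subset_len_eq {l1 l2 : List String} (h1 : l1.Nodup) (h2 : l2.Nodup)
    (hsub : ∀ x ∈ l1, x ∈ l2) (hlen : l1.length = l2.length) : ∀ x ∈ l2, x ∈ l1 := by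
  intro x hx
  have hfsub : l1.toFinset ⊆ l2.toFinset := by
    intro y hy; simpa using hsub y (by simpa using hy)
  have hcard : l2.toFinset.card ≤ l1.toFinset.card := by
    rw [List.toFinset_card_of_nodup h1, List.toFinset_card_of_nodup h2]; omega
  have := Finset.eq_of_subset_of_card_le hfsub hcard
  have : x ∈ l1.toFinset := this ▸ (by simpa using hx)
  simpa using this

-- ===== VERDICT (by name: the statement is the Claim_ definition above) =====
theorem calc_depth_py_spec : Claim_equal_calc_depth_py := by
  intro deps bd _ hpre
  unfold Spec_calc_depth_py calc_depth_py calc_depth_py_alt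
  by_cases hnil : deps.length = 0
  · simp [hnil]
  · simp only [hnil, if_false]
    set need : PySem.Set String := PySem.Set.ofList deps with hneed
    have hmemneed : ∀ x, x ∈ need ↔ x ∈ deps := fun x => PySem.Set.mem_ofList ..
    have hndneed : need.Nodup := PySem.Set.nodup_ofList ..
    rw [calcB_loop_eq]
    set matched := bd.filter (fun kv => PySem.Set.contains need kv.1) with hmatched
    -- the matched keys
    have hmk : ∀ k, k ∈ matched.map Prod.fst ↔ ((∃ v, (k, v) ∈ bd) ∧ k ∈ need) := by
      intro k
      simp only [hmatched, List.mem_map, List.mem_filter]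
      constructor
      · rintro ⟨p, ⟨hp, hcp⟩, rfl⟩
        exact ⟨⟨p.2, hp⟩, (PySem.Set.contains_iff ..).mp hcp⟩
      · rintro ⟨⟨v, hv⟩, hk⟩
        exact ⟨(k, v), ⟨hv, (PySem.Set.contains_iff ..).mpr hk⟩, rfl⟩
    have hmknd : (matched.map Prod.fst).Nodup :=
      (List.Sublist.map Prod.fst List.filter_sublist).nodup hpre
    have hmksub : ∀ k ∈ matched.map Prod.fst, k ∈ need := fun k hk => ((hmk k).mp hk).2
    cases hall : deps.any (fun d => (pvLookup bd d).isNone) with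
    | true =>
      -- some dep is missing from the dict: A returns -1, and B's count falls short
      rw [calcA_loop_miss bd deps 0 hall]
      obtain ⟨d, hd, hdnone⟩ := by
        simpa only [List.any_eq_true, Option.isNone_iff_eq_none] using hall
      have hdnotkey : ¬ ∃ v, (d, v) ∈ bd := by
        rintro ⟨v, hv⟩
        have := lookup_of_mem hpre hv
        simp [this] at hdnone
      have hlenne : matched.length ≠ need.length := by
        intro hlen
        have hlen' : (matched.map Prod.fst).length = need.length := by
          simpa using hlen
        have := nodup_subset_len_eq hmknd hndneed hmksub hlen' d ((hmemneed d).mpr hd)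
        exact hdnotkey ((hmk d).mp this).1
      have hcond : ¬ ((0 : Int) + (matched.length : Int) = PySem.Set.len need) := by
        simp only [PySem.Set.len]
        intro h; apply hlenne; omega
      simp only [hcond, if_false]
    | false =>
      -- every dep is present: both sides are 1 + the max of the same set of depths
      rw [calcA_loop_hit bd deps 0 hall]
      have hpresent : ∀ d ∈ deps, ∃ v, pvLookup bd d = some v := by
        intro d hd
        have := List.any_eq_false.mp hall d hd
        cases h : pvLookup bd d with
        | none => simp [h] at this
        | some v => exact ⟨v, rfl⟩
      -- need ⊆ matched keys
      have hneedsub : ∀ k ∈ need, k ∈ matched.map Prod.fst := by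
        intro k hk
        obtain ⟨v, hv⟩ := hpresent k ((hmemneed k).mp hk)
        have : ∃ p ∈ bd, p.1 = k ∧ p.2 = v := by
          simp only [pvLookup, Option.map_eq_some_iff] at hv
          obtain ⟨p, hp, rfl⟩ := hv
          exact ⟨p, List.mem_of_find?_eq_some hp, by simpa using List.find?_some hp, rfl⟩
        obtain ⟨p, hp, hk1, hv2⟩ := this
        exact (hmk k).mpr ⟨⟨p.2, by rwa [← hk1, Prod.mk.eta]⟩, hk⟩
      have hleneq : matched.length = need.length := by
        have h1 : (matched.map Prod.fst).toFinset = need.toFinset := by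
          apply Finset.ext; intro x
          simp only [List.mem_toFinset]
          exact ⟨fun h => hmksub x h, fun h => hneedsub x h⟩
        have := congrArg Finset.card h1
        rwa [List.toFinset_card_of_nodup hmknd, List.toFinset_card_of_nodup hndneed,
          List.length_map] at this
      have hcond : ((0 : Int) + (matched.length : Int) = PySem.Set.len need) := by
        simp only [PySem.Set.len, hleneq]
        omega
      simp only [hcond, if_true, Int.add_left_inj]
      -- the two value lists have the same members, so their max-folds agree
      apply foldl_max_congr
      · intro x hx
        simp only [List.mem_map] at hx
        obtain ⟨d, hd, rfl⟩ := hx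
        obtain ⟨v, hv⟩ := hpresent d hd
        have : ∃ p ∈ bd, p.1 = d ∧ p.2 = v := by
          simp only [pvLookup, Option.map_eq_some_iff] at hv
          obtain ⟨p, hp, rfl⟩ := hv
          exact ⟨p, List.mem_of_find?_eq_some hp, by simpa using List.find?_some hp, rfl⟩
        obtain ⟨p, hp, hk1, hv2⟩ := this
        refine List.mem_map.mpr ⟨p, List.mem_filter.mpr ⟨hp, ?_⟩, by simp [hv, hv2]⟩
        exact (PySem.Set.contains_iff ..).mpr (by rw [hk1]; exact (hmemneed d).mpr hd)
      · intro x hx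
        simp only [hmatched, List.mem_map, List.mem_filter] at hx
        obtain ⟨p, ⟨hp, hcp⟩, rfl⟩ := hx
        have hk : p.1 ∈ deps := (hmemneed p.1).mp ((PySem.Set.contains_iff ..).mp hcp)
        have : pvLookup bd p.1 = some p.2 := lookup_of_mem hpre (by rw [Prod.mk.eta]; exact hp)
        exact List.mem_map.mpr ⟨p.1, hk, by simp [this]⟩
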